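-- pv_equiv track=rewrite | github.com/SVCE-ACM/A-December-of-Algorithms | December-31/python_shrufire.py | ClosestEnemyII
-- ===== SOURCE A (Python) =====
-- def Distance(start, point, length):
--     return min((start[0]-point[0])%length,(point[0]-start[0])%length) + min((start[1]-point[1])%length,(point[1]-start[1])%length)
--
-- def ClosestEnemyII(strArr):
--     start = []
--     for i in range(0,len(strArr)):
--         if "1" in strArr[i]:
--             start = [i, strArr[i].find("1")]
--     if start == []:
--         return 0
--     answer = 2*len(strArr)
--     for i in range(0,len(strArr)):
--         for j in range(0,len(strArr)):
--             if strArr[i][j]=="2":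
--                 if Distance(start, [i,j], len(strArr)) < answer:
--                     answer = Distance(start, [i,j], len(strArr))
--     return answer
-- ===== SOURCE B (Python) =====
-- def ClosestEnemyII(strArr):
--     # Ring search: expand outward from the start cell by toroidal Manhattan
--     # distance d = 0,1,2,... and return the first level containing a '2'.
--     n = len(strArr)
--     start = None
--     for i, row in enumerate(strArr):
--         j = row.find("1")
--         if j != -1:
--             start = (i, j)
--     if start is None:
--         return 0
--     si, sj = start
--     for d in range(n + 1):
--         for dr in range(d + 1):
--             dc = d - dr
--             for r in ((si + dr) % n, (si - dr) % n):
--                 for c in ((sj + dc) % n, (sj - dc) % n):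
--                     if strArr[r][c] == "2":
--                         return d
--     return 2 * n
-- ===== Notes on version B (the rewrite author's own statement) =====
-- stated objective: alternative
-- what changed: Instead of scanning every cell of the n*n grid and keeping a running minimum toroidal Manhattan distance, B runs an expanding ring search from the start cell, returning the first distance level d = 0,1,... at which some cell at toroidal distance d holds a '2' (and 2*len(strArr) if no level up to n hits).
-- outside the precondition, e.g. on ClosestEnemyII(['11', '2']): A raises IndexError, B returns 1
import Mathlib
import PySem

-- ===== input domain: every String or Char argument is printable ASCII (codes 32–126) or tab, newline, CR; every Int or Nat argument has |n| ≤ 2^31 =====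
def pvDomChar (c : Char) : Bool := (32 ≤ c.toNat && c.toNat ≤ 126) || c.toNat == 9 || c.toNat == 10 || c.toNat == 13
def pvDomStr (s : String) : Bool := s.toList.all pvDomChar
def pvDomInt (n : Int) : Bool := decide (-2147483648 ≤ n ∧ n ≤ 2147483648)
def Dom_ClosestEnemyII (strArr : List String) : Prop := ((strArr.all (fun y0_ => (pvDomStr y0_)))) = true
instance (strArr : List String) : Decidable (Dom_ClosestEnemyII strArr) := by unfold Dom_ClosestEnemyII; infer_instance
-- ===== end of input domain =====

-- B replaces A's full-grid scan by an expanding ring search from the start cell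
-- (first toroidal-Manhattan level that contains a '2'); equivalence is about the
-- return value on inputs where A returns (Pre_ excludes the rows-too-short inputs
-- on which Python A raises IndexError).

-- shared primitive: strArr[r][c] == "2"  (Python raises on an out-of-range index;
-- pvCell2 returns false there — such inputs are excluded by Pre_ClosestEnemyII)
def pvCell2 (g : List String) (r c : Int) : Bool :=
  match PySem.List.pyGet? g r with
  | some row => PySem.Str.pyGet? row c == some '2'
  | none => false

-- ===== PORT A =====
def Distance (start point : Int × Int) (length : Int) : Int :=
  min (PySem.Int.mod (start.1 - point.1) length) (PySem.Int.mod (point.1 - start.1) length)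
  + min (PySem.Int.mod (start.2 - point.2) length) (PySem.Int.mod (point.2 - start.2) length)

def pvStartA (g : List String) : Option (Int × Int) :=
  (PySem.List.pyRange 0 (PySem.List.len g)).foldl
    (fun st i =>
      if PySem.Str.isIn "1" (PySem.List.pyGetD g i "") then
        some (i, PySem.Str.find (PySem.List.pyGetD g i "") "1")
      else st) none

def ClosestEnemyII (strArr : List String) : Int :=
  match pvStartA strArr with
  | none => 0
  | some s =>
    (PySem.List.pyRange 0 (PySem.List.len strArr)).foldl
      (fun answer i =>
        (PySem.List.pyRange 0 (PySem.List.len strArr)).foldl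
          (fun answer j =>
            if pvCell2 strArr i j then
              if Distance s (i, j) (PySem.List.len strArr) < answer then
                Distance s (i, j) (PySem.List.len strArr)
              else answer
            else answer)
          answer)
      (2 * PySem.List.len strArr)

-- ===== PORT B =====
def pvStartB (g : List String) : Option (Int × Int) :=
  (PySem.List.enumerate g).foldl
    (fun st p =>
      let j := PySem.Str.find p.2 "1"
      if j ≠ -1 then some (p.1, j) else st) none

-- the four cells at row offset ±dr, column offset ±dc from (si, sj), checked for '2'
def pvHit (g : List String) (n si sj d : Int) : Bool :=
  (PySem.List.pyRange 0 (d + 1)).any (fun dr =>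
    let dc := d - dr
    pvCell2 g (PySem.Int.mod (si + dr) n) (PySem.Int.mod (sj + dc) n) ||
    pvCell2 g (PySem.Int.mod (si + dr) n) (PySem.Int.mod (sj - dc) n) ||
    pvCell2 g (PySem.Int.mod (si - dr) n) (PySem.Int.mod (sj + dc) n) ||
    pvCell2 g (PySem.Int.mod (si - dr) n) (PySem.Int.mod (sj - dc) n))

-- `for d in range(n+1): if hit: return d` then `return 2*n`
def pvSearch (g : List String) (n si sj : Int) : Nat → Int → Int
  | 0, _ => 2 * n
  | Nat.succ fuel, d => if pvHit g n si sj d then d else pvSearch g n si sj fuel (d + 1)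

def ClosestEnemyII_alt (strArr : List String) : Int :=
  match pvStartB strArr with
  | none => 0
  | some s => pvSearch strArr (PySem.List.len strArr) s.1 s.2 (strArr.length + 1) 0

-- ===== PRECONDITION & SPEC =====
-- Pre_ excludes exactly the inputs on which Python A raises IndexError: a grid that
-- contains a '1' but has some row shorter than len(strArr) (A indexes strArr[i][j]
-- for all j < len(strArr)).
def Pre_ClosestEnemyII (strArr : List String) : Prop :=
  (∀ s ∈ strArr, PySem.Str.isIn "1" s = false) ∨
  (∀ s ∈ strArr, strArr.length ≤ s.toList.length)

instance (strArr : List String) : Decidable (Pre_ClosestEnemyII strArr) := by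
  unfold Pre_ClosestEnemyII; infer_instance

def pvWitness_ClosestEnemyII : List String := ["102", "000", "001"]

def Spec_ClosestEnemyII (strArr : List String) (out : Int) : Prop := out = ClosestEnemyII_alt strArr
instance (strArr : List String) (out : Int) : Decidable (Spec_ClosestEnemyII strArr out) := by unfold Spec_ClosestEnemyII; infer_instance

-- ===== CLAIM (what is proved, stated in full; the proofs are below) =====
def Claim_equal_ClosestEnemyII : Prop := ∀ (strArr : List String), Dom_ClosestEnemyII strArr → Pre_ClosestEnemyII strArr → Spec_ClosestEnemyII strArr (ClosestEnemyII strArr)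

-- ===== LEMMAS AND PROOFS =====

-- the two start-finding loops agree
lemma pv_start_eq (g : List String) : pvStartA g = pvStartB g := by
  unfold pvStartA pvStartB
  rw [PySem.List.enumerate_eq_map_pyRange g "", List.foldl_map]
  congr 1
  funext st i
  by_cases h : (['1'] <:+: (PySem.List.pyGetD g i "").toList)
  · have h1 : PySem.Chars.isIn ['1'] (PySem.List.pyGetD g i "").toList = true :=
      (PySem.Chars.isIn_iff_infix _ _).mpr h
    have h2 : PySem.Chars.find (PySem.List.pyGetD g i "").toList ['1'] ≠ -1 :=
      (PySem.Chars.find_ne_neg_one_iff _ _).mpr h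
    simp [h1, h2]
  · have h1 : PySem.Chars.isIn ['1'] (PySem.List.pyGetD g i "").toList = false :=
      (PySem.Chars.isIn_eq_false_iff _ _).mpr h
    have h2 : PySem.Chars.find (PySem.List.pyGetD g i "").toList ['1'] = -1 :=
      (PySem.Chars.find_eq_neg_one_iff _ _).mpr h
    simp [h1, h2]

-- flatten the nested loop of A into one fold over the product list
lemma pv_foldl_nest {α β : Type} (L1 : List α) (L2 : List β)
    (step : Int → α × β → Int) (init : Int) :
    L1.foldl (fun a i => L2.foldl (fun a' j => step a' (i, j)) a) init
      = (L1.flatMap (fun i => L2.map (fun j => (i, j)))).foldl step init := by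
  induction L1 generalizing init with
  | nil => rfl
  | cons x xs ih =>
      simp only [List.flatMap_cons, List.foldl_append, List.foldl_map, List.foldl_cons]
      exact ih _

-- characterisation of A's running-minimum fold
lemma pv_foldl_min {γ : Type} (P : γ → Bool) (f : γ → Int) (l : List γ) (a : Int) :
    (l.foldl (fun acc p => if P p then (if f p < acc then f p else acc) else acc) a ≤ a)
    ∧ (∀ p ∈ l, P p = true →
        l.foldl (fun acc p => if P p then (if f p < acc then f p else acc) else acc) a ≤ f p)
    ∧ (l.foldl (fun acc p => if P p then (if f p < acc then f p else acc) else acc) a = a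
        ∨ ∃ p ∈ l, P p = true ∧
          l.foldl (fun acc p => if P p then (if f p < acc then f p else acc) else acc) a = f p) := by
  induction l generalizing a with
  | nil => simp
  | cons x l ih =>
      obtain ⟨ih1, ih2, ih3⟩ := ih (if P x then (if f x < a then f x else a) else a)
      simp only [List.foldl_cons]
      refine ⟨le_trans ih1 (by split_ifs <;> omega), ?_, ?_⟩
      · intro p hp hP
        rcases List.mem_cons.mp hp with rfl | hp
        · exact le_trans ih1 (by simp only [hP, if_true]; split_ifs <;> omega)
        · exact ih2 p hp hP
      · rcases ih3 with h | ⟨p, hp, hP, hr⟩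
        · by_cases hPx : P x = true
          · by_cases hfx : f x < a
            · exact Or.inr ⟨x, List.mem_cons_self, hPx, by rw [h]; simp [hPx, hfx]⟩
            · exact Or.inl (by rw [h]; simp [hPx, hfx])
          · exact Or.inl (by rw [h]; simp [hPx])
        · exact Or.inr ⟨p, List.mem_cons_of_mem _ hp, hP, hr⟩

lemma pv_mem_prod {n : Int} {p : Int × Int} :
    p ∈ (PySem.List.pyRange 0 n).flatMap (fun i => (PySem.List.pyRange 0 n).map (fun j => (i, j)))
      ↔ (0 ≤ p.1 ∧ p.1 < n ∧ 0 ≤ p.2 ∧ p.2 < n) := by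
  obtain ⟨i, j⟩ := p
  simp only [List.mem_flatMap, List.mem_map, PySem.List.mem_pyRange_one, Prod.mk.injEq]
  constructor
  · rintro ⟨a, ⟨ha0, ha1⟩, b, ⟨hb0, hb1⟩, rfl, rfl⟩; exact ⟨ha0, ha1, hb0, hb1⟩
  · rintro ⟨h0, h1, h2, h3⟩; exact ⟨i, ⟨h0, h1⟩, j, ⟨h2, h3⟩, rfl, rfl⟩

-- ---- integer mod arithmetic ----
lemma pv_emod_le {x n : Int} (hx : 0 ≤ x) (hn : 0 < n) : x % n ≤ x := by
  rw [Int.emod_def]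
  have h1 : 0 ≤ x / n := Int.ediv_nonneg hx (le_of_lt hn)
  nlinarith

lemma pv_shift_emod (a dr n : Int) : ((a + dr) % n - a) % n = dr % n := by
  rw [Int.sub_emod, Int.emod_emod_of_dvd _ dvd_rfl, ← Int.sub_emod, add_sub_cancel_left]

lemma pv_shift_emod' (a dr n : Int) : (a - (a - dr) % n) % n = dr % n := by
  rw [Int.sub_emod a ((a - dr) % n), Int.emod_emod_of_dvd _ dvd_rfl, ← Int.sub_emod,
    sub_sub_cancel]

lemma pv_add_emod_eq {i n : Int} (a : Int) (h0 : 0 ≤ i) (h1 : i < n) :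
    (a + (i - a) % n) % n = i := by
  rw [Int.add_emod, Int.emod_emod_of_dvd _ dvd_rfl, ← Int.add_emod, add_sub_cancel]
  exact Int.emod_eq_of_lt h0 h1

lemma pv_sub_emod_eq {i n : Int} (a : Int) (h0 : 0 ≤ i) (h1 : i < n) :
    (a - (a - i) % n) % n = i := by
  rw [pv_shift_emod']; exact Int.emod_eq_of_lt h0 h1

lemma pv_emod_add_neg_le (u n : Int) (hn : 0 < n) : u % n + (-u) % n ≤ n := by
  have hz : (u % n + (-u) % n) % n = 0 := by
    rw [← Int.add_emod]; simp
  have hu1 : 0 ≤ u % n := Int.emod_nonneg _ (ne_of_gt hn)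
  have hu2 : u % n < n := Int.emod_lt_of_pos _ hn
  have hv1 : 0 ≤ (-u) % n := Int.emod_nonneg _ (ne_of_gt hn)
  have hv2 : (-u) % n < n := Int.emod_lt_of_pos _ hn
  obtain ⟨k, hk⟩ := Int.dvd_of_emod_eq_zero hz
  have hk0 : 0 ≤ k := by nlinarith
  have hk1 : k ≤ 1 := by nlinarith
  nlinarith

-- ---- the toroidal row/column distance ----
def pvRow (a b n : Int) : Int :=
  min (PySem.Int.mod (a - b) n) (PySem.Int.mod (b - a) n)

lemma pv_Distance_eq (s p : Int × Int) (n : Int) :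
    Distance s p n = pvRow s.1 p.1 n + pvRow s.2 p.2 n := rfl

lemma pvRow_nonneg {n : Int} (a b : Int) (hn : 0 < n) : 0 ≤ pvRow a b n := by
  unfold pvRow
  rw [PySem.Int.mod_eq_emod_of_pos hn, PySem.Int.mod_eq_emod_of_pos hn]
  exact le_min (Int.emod_nonneg _ (ne_of_gt hn)) (Int.emod_nonneg _ (ne_of_gt hn))

lemma pvRow_two_mul_le {n : Int} (a b : Int) (hn : 0 < n) : 2 * pvRow a b n ≤ n := by
  unfold pvRow
  rw [PySem.Int.mod_eq_emod_of_pos hn, PySem.Int.mod_eq_emod_of_pos hn]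
  have := pv_emod_add_neg_le (a - b) n hn
  rw [neg_sub] at this
  have h1 : min ((a - b) % n) ((b - a) % n) ≤ (a - b) % n := min_le_left _ _
  have h2 : min ((a - b) % n) ((b - a) % n) ≤ (b - a) % n := min_le_right _ _
  omega

lemma pvRow_add_le {n : Int} (a dr : Int) (hn : 0 < n) (hdr : 0 ≤ dr) :
    pvRow a (PySem.Int.mod (a + dr) n) n ≤ dr := by
  unfold pvRow
  rw [PySem.Int.mod_eq_emod_of_pos hn, PySem.Int.mod_eq_emod_of_pos hn,
    PySem.Int.mod_eq_emod_of_pos hn]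
  refine le_trans (min_le_right _ _) ?_
  rw [pv_shift_emod]
  exact pv_emod_le hdr hn

lemma pvRow_sub_le {n : Int} (a dr : Int) (hn : 0 < n) (hdr : 0 ≤ dr) :
    pvRow a (PySem.Int.mod (a - dr) n) n ≤ dr := by
  unfold pvRow
  rw [PySem.Int.mod_eq_emod_of_pos hn, PySem.Int.mod_eq_emod_of_pos hn,
    PySem.Int.mod_eq_emod_of_pos hn]
  refine le_trans (min_le_left _ _) ?_
  rw [pv_shift_emod']
  exact pv_emod_le hdr hn

lemma pvRow_cases {i n : Int} (a : Int) (hn : 0 < n) (h0 : 0 ≤ i) (h1 : i < n) :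
    PySem.Int.mod (a + pvRow a i n) n = i ∨ PySem.Int.mod (a - pvRow a i n) n = i := by
  unfold pvRow
  rw [PySem.Int.mod_eq_emod_of_pos hn, PySem.Int.mod_eq_emod_of_pos hn,
    PySem.Int.mod_eq_emod_of_pos hn, PySem.Int.mod_eq_emod_of_pos hn]
  rcases min_choice ((a - i) % n) ((i - a) % n) with h | h
  · right; rw [h]; exact pv_sub_emod_eq a h0 h1
  · left; rw [h]; exact pv_add_emod_eq a h0 h1

lemma pv_dist_nonneg {n : Int} (s p : Int × Int) (hn : 0 < n) : 0 ≤ Distance s p n := by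
  rw [pv_Distance_eq]
  have := pvRow_nonneg s.1 p.1 hn
  have := pvRow_nonneg s.2 p.2 hn
  omega

lemma pv_dist_le {n : Int} (s p : Int × Int) (hn : 0 < n) : Distance s p n ≤ n := by
  rw [pv_Distance_eq]
  have := pvRow_two_mul_le s.1 p.1 hn
  have := pvRow_two_mul_le s.2 p.2 hn
  omega

-- ---- the ring predicate pvHit vs the distance function ----
lemma pv_hit_sound {g : List String} {n si sj d : Int} (hn : 0 < n)
    (h : pvHit g n si sj d = true) :
    ∃ p : Int × Int, 0 ≤ p.1 ∧ p.1 < n ∧ 0 ≤ p.2 ∧ p.2 < n ∧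
      pvCell2 g p.1 p.2 = true ∧ Distance (si, sj) p n ≤ d := by
  unfold pvHit at h
  rw [List.any_eq_true] at h
  obtain ⟨dr, hmem, hdr⟩ := h
  rw [PySem.List.mem_pyRange_one] at hmem
  obtain ⟨hdr0, hdr1⟩ := hmem
  have hdc0 : 0 ≤ d - dr := by omega
  simp only [Bool.or_eq_true] at hdr
  have hb : ∀ x : Int, 0 ≤ PySem.Int.mod x n ∧ PySem.Int.mod x n < n := by
    intro x
    rw [PySem.Int.mod_eq_emod_of_pos hn]
    exact ⟨Int.emod_nonneg _ (ne_of_gt hn), Int.emod_lt_of_pos _ hn⟩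
  rcases hdr with ((h4 | h4) | h4) | h4
  · exact ⟨(PySem.Int.mod (si + dr) n, PySem.Int.mod (sj + (d - dr)) n),
      (hb _).1, (hb _).2, (hb _).1, (hb _).2, h4, by
        rw [pv_Distance_eq]
        dsimp only
        have := pvRow_add_le si dr hn hdr0
        have := pvRow_add_le sj (d - dr) hn hdc0
        omega⟩
  · exact ⟨(PySem.Int.mod (si + dr) n, PySem.Int.mod (sj - (d - dr)) n),
      (hb _).1, (hb _).2, (hb _).1, (hb _).2, h4, by
        rw [pv_Distance_eq]
        dsimp only
        have := pvRow_add_le si dr hn hdr0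
        have := pvRow_sub_le sj (d - dr) hn hdc0
        omega⟩
  · exact ⟨(PySem.Int.mod (si - dr) n, PySem.Int.mod (sj + (d - dr)) n),
      (hb _).1, (hb _).2, (hb _).1, (hb _).2, h4, by
        rw [pv_Distance_eq]
        dsimp only
        have := pvRow_sub_le si dr hn hdr0
        have := pvRow_add_le sj (d - dr) hn hdc0
        omega⟩
  · exact ⟨(PySem.Int.mod (si - dr) n, PySem.Int.mod (sj - (d - dr)) n),
      (hb _).1, (hb _).2, (hb _).1, (hb _).2, h4, by
        rw [pv_Distance_eq]
        dsimp only
        have := pvRow_sub_le si dr hn hdr0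
        have := pvRow_sub_le sj (d - dr) hn hdc0
        omega⟩

lemma pv_hit_complete {g : List String} {n si sj : Int} (hn : 0 < n)
    (p : Int × Int) (h0 : 0 ≤ p.1) (h1 : p.1 < n) (h2 : 0 ≤ p.2) (h3 : p.2 < n)
    (hc : pvCell2 g p.1 p.2 = true) :
    pvHit g n si sj (Distance (si, sj) p n) = true := by
  obtain ⟨i, j⟩ := p
  unfold pvHit
  rw [List.any_eq_true]
  refine ⟨pvRow si i n, ?_, ?_⟩
  · rw [PySem.List.mem_pyRange_one, pv_Distance_eq]
    dsimp only
    have := pvRow_nonneg si i hn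
    have := pvRow_nonneg sj j hn
    omega
  · have hdc : Distance (si, sj) (i, j) n - pvRow si i n = pvRow sj j n := by
      rw [pv_Distance_eq]; ring
    simp only [hdc, Bool.or_eq_true]
    rcases pvRow_cases si hn h0 h1 with hi | hi <;>
      rcases pvRow_cases sj hn h2 h3 with hj | hj
    · exact Or.inl (Or.inl (Or.inl (by rw [hi, hj]; exact hc)))
    · exact Or.inl (Or.inl (Or.inr (by rw [hi, hj]; exact hc)))
    · exact Or.inl (Or.inr (by rw [hi, hj]; exact hc))
    · exact Or.inr (by rw [hi, hj]; exact hc)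

-- note: pvRow_cases gives (a+dr)%n = i ∨ (a-dr)%n = i; in pvHit the column offset
-- appears as sj+dc and sj-dc, matching the two cases above

-- ---- pvSearch characterisation ----
lemma pv_search_hit (g : List String) (n si sj : Int) (fuel : Nat) :
    ∀ d m : Int, d ≤ m → m < d + (fuel : Int) → pvHit g n si sj m = true →
      (∀ e, d ≤ e → e < m → pvHit g n si sj e = false) →
      pvSearch g n si sj fuel d = m := by
  induction fuel with
  | zero => intro d m h1 h2 _ _; push_cast at h2; omega
  | succ fuel ih =>
      intro d m h1 h2 hm hmin
      unfold pvSearch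
      by_cases hd : pvHit g n si sj d = true
      · have hdm : d = m := by
          by_contra hne
          have hdm : d < m := by omega
          rw [hmin d le_rfl hdm] at hd; exact absurd hd (by simp)
        subst hdm
        simp [hd]
      · have hdm : d ≠ m := fun h => hd (h ▸ hm)
        simp only [hd, if_false, Bool.false_eq_true]
        exact ih (d + 1) m (by omega) (by push_cast at h2 ⊢; omega) hm
          (fun e he1 he2 => hmin e (by omega) he2)

lemma pv_search_miss (g : List String) (n si sj : Int) (fuel : Nat) :
    ∀ d : Int, (∀ e, d ≤ e → e < d + (fuel : Int) → pvHit g n si sj e = false) →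
      pvSearch g n si sj fuel d = 2 * n := by
  induction fuel with
  | zero => intro d _; rfl
  | succ fuel ih =>
      intro d h
      unfold pvSearch
      have hd : pvHit g n si sj d = false := h d le_rfl (by push_cast; omega)
      simp only [hd, Bool.false_eq_true, if_false]
      exact ih (d + 1) (fun e he1 he2 => h e (by omega) (by push_cast at he2 ⊢; omega))


-- the heart of the equivalence: A's running minimum over all cells equals the
-- first ring level at which B's search finds a '2'
lemma pv_main (g : List String) (n si sj : Int) (hn : 0 < n)
    (hnlen : n = (g.length : Int)) (L : List (Int × Int))
    (hL : ∀ p : Int × Int, p ∈ L ↔ (0 ≤ p.1 ∧ p.1 < n ∧ 0 ≤ p.2 ∧ p.2 < n)) :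
    L.foldl (fun acc p => if pvCell2 g p.1 p.2 then
        (if Distance (si, sj) p n < acc then Distance (si, sj) p n else acc) else acc) (2 * n)
      = pvSearch g n si sj (g.length + 1) 0 := by
  obtain ⟨hle, hlb, hcase⟩ :=
    pv_foldl_min (fun p : Int × Int => pvCell2 g p.1 p.2)
      (fun p : Int × Int => Distance (si, sj) p n) L (2 * n)
  by_cases hex : ∃ p ∈ L, pvCell2 g p.1 p.2 = true
  · obtain ⟨p0, hp0L, hp0⟩ := hex
    rcases hcase with hval | ⟨p1, hp1L, hP1, hval⟩
    · exfalso
      have h1 := hlb p0 hp0L hp0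
      have h2 := pv_dist_le (si, sj) p0 hn
      omega
    · obtain ⟨c1, c2, c3, c4⟩ := (hL p1).mp hp1L
      refine (pv_search_hit g n si sj (g.length + 1) 0 _ ?_ ?_ ?_ ?_).symm
      · rw [hval]; exact pv_dist_nonneg _ _ hn
      · have h2 := pv_dist_le (si, sj) p1 hn
        rw [hval]; push_cast; omega
      · rw [hval]; exact pv_hit_complete hn p1 c1 c2 c3 c4 hP1
      · intro e he0 her
        by_contra hfalse
        have htrue : pvHit g n si sj e = true := by
          cases h : pvHit g n si sj e
          · exact absurd h hfalse
          · rfl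
        obtain ⟨q, q1, q2, q3, q4, qP, qD⟩ := pv_hit_sound hn htrue
        have hq : q ∈ L := (hL q).mpr ⟨q1, q2, q3, q4⟩
        have := hlb q hq qP
        omega
  · replace hex : ∀ p ∈ L, pvCell2 g p.1 p.2 ≠ true := fun p hp hc => hex ⟨p, hp, hc⟩
    have hr2n : L.foldl (fun acc p => if pvCell2 g p.1 p.2 then
        (if Distance (si, sj) p n < acc then Distance (si, sj) p n else acc) else acc) (2 * n)
        = 2 * n := by
      rcases hcase with h | ⟨p, hpL, hP, _⟩
      · exact h
      · exact absurd hP (hex p hpL)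
    rw [hr2n]
    refine (pv_search_miss g n si sj (g.length + 1) 0 ?_).symm
    intro e _ _
    by_contra hfalse
    have htrue : pvHit g n si sj e = true := by
      cases h : pvHit g n si sj e
      · exact absurd h hfalse
      · rfl
    obtain ⟨q, q1, q2, q3, q4, qP, _⟩ := pv_hit_sound hn htrue
    exact absurd qP (hex q ((hL q).mpr ⟨q1, q2, q3, q4⟩))

-- an empty grid has no start
lemma pv_start_nil : pvStartA [] = none := by
  unfold pvStartA
  simp

-- ===== VERDICT (by name: the statement is the Claim_ definition above) =====
theorem ClosestEnemyII_spec : Claim_equal_ClosestEnemyII := by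
  intro g _ _
  unfold Spec_ClosestEnemyII ClosestEnemyII ClosestEnemyII_alt
  rw [← pv_start_eq]
  cases hst : pvStartA g with
  | none => rfl
  | some s =>
      obtain ⟨si, sj⟩ := s
      have hg : g ≠ [] := by
        intro h0; rw [h0, pv_start_nil] at hst; simp at hst
      have hn : 0 < PySem.List.len g := by
        rw [PySem.List.len_eq]
        exact_mod_cast List.length_pos_iff.mpr hg
      refine Eq.trans
        (pv_foldl_nest (PySem.List.pyRange 0 (PySem.List.len g))
          (PySem.List.pyRange 0 (PySem.List.len g))
          (fun acc p => if pvCell2 g p.1 p.2 then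
            (if Distance (si, sj) p (PySem.List.len g) < acc then
              Distance (si, sj) p (PySem.List.len g) else acc) else acc)
          (2 * PySem.List.len g))
        (pv_main g (PySem.List.len g) si sj hn (PySem.List.len_eq g) _ (fun p => pv_mem_prod))
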